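-- pv_equiv track=rewrite | github.com/P79N6A/daily-practice | code/python/algorithms/random.py | mutual_prime
-- ===== SOURCE A (Python) =====
-- def mutual_prime(a, b) -> bool:
--     if a < b:
--         a, b = b, a
--     while b != 0:
--         remainder = a % b
--         a, b = b, remainder
--     if a == 1:
--         return True
--     return False
-- ===== SOURCE B (Python) =====
-- def _bgcd(a, b):
--     # binary (Stein) gcd on nonnegative ints: shifts and subtraction, no division
--     if a == 0:
--         return b
--     if b == 0:
--         return a
--     shift = 0
--     while a & 1 == 0 and b & 1 == 0:
--         a >>= 1
--         b >>= 1
--         shift += 1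
--     while a & 1 == 0:
--         a >>= 1
--     while b != 0:
--         while b & 1 == 0:
--             b >>= 1
--         if a > b:
--             a, b = b, a
--         b -= a
--     return a << shift
--
--
-- def mutual_prime(a, b) -> bool:
--     if a < 0 or b < 0:
--         return False
--     return _bgcd(a, b) == 1
-- ===== Notes on version B (the rewrite author's own statement) =====
-- stated objective: alternative
-- what changed: Replaces A's %-based Euclid loop (with initial swap) by a negative-sign early return followed by a binary (Stein) gcd that uses only shifts and subtraction, then compares the gcd with 1.
import Mathlib
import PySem

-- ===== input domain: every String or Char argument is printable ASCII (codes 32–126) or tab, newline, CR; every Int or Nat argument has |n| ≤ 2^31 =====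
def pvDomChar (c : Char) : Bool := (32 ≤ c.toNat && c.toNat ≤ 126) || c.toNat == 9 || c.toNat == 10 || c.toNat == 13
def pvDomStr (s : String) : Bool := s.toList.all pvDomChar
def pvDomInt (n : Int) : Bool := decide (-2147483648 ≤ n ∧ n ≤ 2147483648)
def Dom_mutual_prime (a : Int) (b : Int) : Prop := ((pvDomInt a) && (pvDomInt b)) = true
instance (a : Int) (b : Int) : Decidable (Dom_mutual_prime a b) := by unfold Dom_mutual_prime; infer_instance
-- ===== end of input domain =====

-- B replaces A's %-based Euclid loop by a negative-sign early return followed by a binary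
-- (Stein) gcd using only shifts and subtraction (objective: alternative algorithm, same values).

-- termination measure for Python's % (sign of the divisor): |a % b| < |b| when b ≠ 0
theorem pymod_natAbs_lt (a b : Int) (h : ¬ b = 0) :
    (PySem.Int.mod a b).natAbs < b.natAbs := by
  rcases lt_or_gt_of_ne h with hb | hb
  · have := PySem.Int.mod_neg_bounds a hb
    omega
  · have h1 := PySem.Int.mod_nonneg a hb
    have h2 := PySem.Int.mod_lt a hb
    omega

-- ===== PORT A =====
-- the while loop of A: state (a, b), body 'remainder = a % b; a, b = b, remainder'
def mutualPrimeLoop (a : Int) (b : Int) : Int :=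
  if h : b = 0 then a
  else
    let remainder := PySem.Int.mod a b
    mutualPrimeLoop b remainder
termination_by b.natAbs
decreasing_by exact pymod_natAbs_lt a b h

def mutual_prime (a : Int) (b : Int) : Bool :=
  let p := if a < b then (b, a) else (a, b)
  let a := mutualPrimeLoop p.1 p.2
  if a = 1 then true else false

-- ===== PORT B =====
-- Source B's 'while a & 1 == 0 and b & 1 == 0: a >>= 1; b >>= 1; shift += 1'
-- (the 'a ≠ 0' conjunct is a totality guard only: _bgcd checks a ≠ 0 before this loop,
--  and halving an even nonzero number keeps it nonzero, so the guard never fires)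
def commonTwos (a : Nat) (b : Nat) (shift : Nat) : Nat × Nat × Nat :=
  if h : a % 2 = 0 ∧ b % 2 = 0 ∧ a ≠ 0 then commonTwos (a / 2) (b / 2) (shift + 1)
  else (a, b, shift)
termination_by a
decreasing_by exact Nat.div_lt_self (Nat.pos_of_ne_zero h.2.2) (by norm_num)

-- Source B's 'while x & 1 == 0: x >>= 1' (the 'x ≠ 0' conjunct is a totality guard only:
--  both call sites pass a nonzero value, which halving an even number preserves)
def oddPart (x : Nat) : Nat :=
  if h : x % 2 = 0 ∧ x ≠ 0 then oddPart (x / 2) else x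
termination_by x
decreasing_by exact Nat.div_lt_self (Nat.pos_of_ne_zero h.2) (by norm_num)

-- facts needed by steinLoop's termination measure (cited in its decreasing_by)
theorem oddPart_ne_zero (x : Nat) (hx : x ≠ 0) : oddPart x ≠ 0 := by
  induction x using oddPart.induct with
  | case1 x h ih => rw [oddPart, dif_pos h]; exact ih (by omega)
  | case2 x h => rw [oddPart, dif_neg h]; exact hx

theorem oddPart_le (x : Nat) : oddPart x ≤ x := by
  induction x using oddPart.induct with
  | case1 x h ih => rw [oddPart, dif_pos h]; omega
  | case2 x h => rw [oddPart, dif_neg h]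

-- Source B's outer 'while b != 0' loop: strip b's twos, swap so a ≤ b, b -= a.
-- (the 'a = 0' early exit is a totality guard only: _bgcd checks a ≠ 0 up front and
--  every later a is a minimum of two odd positive numbers)
def steinLoop (a : Nat) (b : Nat) : Nat :=
  if a = 0 then a
  else if hb : b = 0 then a
  else
    let bo := oddPart b
    let p := if a > bo then (bo, a) else (a, bo)
    steinLoop p.1 (p.2 - p.1)
termination_by a + b
decreasing_by
  rename_i ha
  have h1 := oddPart_ne_zero b hb
  have h2 := oddPart_le b
  by_cases hc : a > oddPart b <;> simp [hc] <;> omega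

-- Source B's _bgcd, on the nonnegative values it is called with (Nat is exact there:
-- Python's >>1 / &1 / << on nonnegative ints are /2 / %2 / *2^ on Nat)
def bgcdNat (a : Nat) (b : Nat) : Nat :=
  if a = 0 then b
  else if b = 0 then a
  else
    let t := commonTwos a b 0
    let a1 := oddPart t.1
    (steinLoop a1 t.2.1) <<< t.2.2

def mutual_prime_alt (a : Int) (b : Int) : Bool :=
  if a < 0 || b < 0 then false
  else bgcdNat a.toNat b.toNat == 1

-- ===== PRECONDITION & SPEC =====
def Spec_mutual_prime (a : Int) (b : Int) (out : Bool) : Prop := out = mutual_prime_alt a b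
instance (a : Int) (b : Int) (out : Bool) : Decidable (Spec_mutual_prime a b out) := by unfold Spec_mutual_prime; infer_instance

-- ===== CLAIM (what is proved, stated in full; the proofs are below) =====
def Claim_equal_mutual_prime : Prop := ∀ (a : Int) (b : Int), Dom_mutual_prime a b → Spec_mutual_prime a b (mutual_prime a b)

-- ===== LEMMAS AND PROOFS =====

theorem oddPart_odd (x : Nat) (hx : x ≠ 0) : oddPart x % 2 = 1 := by
  induction x using oddPart.induct with
  | case1 x h ih => rw [oddPart, dif_pos h]; exact ih (by omega)
  | case2 x h => rw [oddPart, dif_neg h]; omega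

-- stripping twos from the second argument preserves the gcd when the first is odd
theorem gcd_oddPart_right (a x : Nat) (ha : a % 2 = 1) :
    Nat.gcd a (oddPart x) = Nat.gcd a x := by
  induction x using oddPart.induct with
  | case1 x h ih =>
      rw [oddPart, dif_pos h, ih]
      have hx2 : x = 2 * (x / 2) := by omega
      conv_rhs => rw [hx2]
      exact (Nat.Coprime.gcd_mul_left_cancel_right (x / 2)
        (Nat.coprime_two_left.mpr (Nat.odd_iff.mpr ha))).symm
  | case2 x h => rw [oddPart, dif_neg h]

theorem gcd_oddPart_left (a x : Nat) (ha : a % 2 = 1) :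
    Nat.gcd (oddPart x) a = Nat.gcd x a := by
  rw [Nat.gcd_comm, gcd_oddPart_right a x ha, Nat.gcd_comm]

-- invariant of the common-twos loop
theorem commonTwos_spec (a b shift : Nat) (ha : a ≠ 0) :
    Nat.gcd (commonTwos a b shift).1 (commonTwos a b shift).2.1 * 2 ^ (commonTwos a b shift).2.2
        = Nat.gcd a b * 2 ^ shift
      ∧ (commonTwos a b shift).1 ≠ 0
      ∧ ¬ ((commonTwos a b shift).1 % 2 = 0 ∧ (commonTwos a b shift).2.1 % 2 = 0) := by
  induction a, b, shift using commonTwos.induct with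
  | case1 a b shift h ih =>
      rw [commonTwos, dif_pos h]
      obtain ⟨h1, h2, h3⟩ := ih (by omega)
      refine ⟨?_, h2, h3⟩
      rw [h1]
      have ha2 : a = 2 * (a / 2) := by omega
      have hb2 : b = 2 * (b / 2) := by omega
      conv_rhs => rw [ha2, hb2]
      rw [Nat.gcd_mul_left, pow_succ]
      ring
  | case2 a b shift h =>
      rw [commonTwos, dif_neg h]
      exact ⟨rfl, ha, fun hc => h ⟨hc.1, hc.2, ha⟩⟩

-- the subtraction loop computes the gcd when its first argument is odd
theorem steinLoop_gcd (a b : Nat) (ha : a % 2 = 1) :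
    steinLoop a b = Nat.gcd a b := by
  induction a, b using steinLoop.induct with
  | case1 b => omega
  | case2 a h => rw [steinLoop]; simp [h]
  | case3 a b h hb bo p ih =>
      rw [steinLoop, if_neg h, dif_neg hb]
      show steinLoop p.1 (p.2 - p.1) = Nat.gcd a b
      have hbo_odd : bo % 2 = 1 := oddPart_odd b hb
      have hgbo : Nat.gcd a bo = Nat.gcd a b := gcd_oddPart_right a b ha
      by_cases hc : a > bo
      · have hp : p = (bo, a) := by simp [p, hc]
        rw [hp] at ih ⊢
        simp only at ih ⊢
        rw [ih hbo_odd, Nat.gcd_sub_self_right (by omega), Nat.gcd_comm bo a, hgbo]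
      · have hp : p = (a, bo) := by simp [p, hc]
        rw [hp] at ih ⊢
        simp only at ih ⊢
        rw [ih ha, Nat.gcd_sub_self_right (by omega), hgbo]

-- Source B's _bgcd computes Nat.gcd
theorem bgcdNat_eq_gcd (a b : Nat) : bgcdNat a b = Nat.gcd a b := by
  unfold bgcdNat
  by_cases ha : a = 0
  · simp [ha]
  by_cases hb : b = 0
  · simp [ha, hb]
  simp only [ha, hb, if_false]
  obtain ⟨h1, h2, h3⟩ := commonTwos_spec a b 0 ha
  have hga : Nat.gcd (oddPart (commonTwos a b 0).1) (commonTwos a b 0).2.1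
      = Nat.gcd (commonTwos a b 0).1 (commonTwos a b 0).2.1 := by
    by_cases hodd : (commonTwos a b 0).1 % 2 = 1
    · have : oddPart (commonTwos a b 0).1 = (commonTwos a b 0).1 := by
        rw [oddPart, dif_neg]; omega
      rw [this]
    · have hb'odd : (commonTwos a b 0).2.1 % 2 = 1 := by omega
      exact gcd_oddPart_left _ _ hb'odd
  rw [steinLoop_gcd _ _ (oddPart_odd _ h2), hga, Nat.shiftLeft_eq, h1]
  simp

-- with a negative second argument A's loop result stays negative (can never be 1)
theorem loop_neg (a b : Int) (hb : b < 0) : mutualPrimeLoop a b < 0 := by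
  induction a, b using mutualPrimeLoop.induct with
  | case1 a => omega
  | case2 a b h rem ih =>
      rw [mutualPrimeLoop, dif_neg h]
      have hbd := PySem.Int.mod_neg_bounds a (show b < 0 by omega)
      show mutualPrimeLoop b (PySem.Int.mod a b) < 0
      by_cases hr : PySem.Int.mod a b = 0
      · rw [hr, mutualPrimeLoop, dif_pos rfl]; omega
      · exact ih (by omega)

-- on nonnegative inputs A's loop computes the ordinary gcd (the swap is irrelevant here)
theorem loop_gcd (a b : Int) (ha : 0 ≤ a) (hb : 0 ≤ b) :
    mutualPrimeLoop a b = (Nat.gcd a.toNat b.toNat : Int) := by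
  induction a, b using mutualPrimeLoop.induct with
  | case1 a => rw [mutualPrimeLoop, dif_pos rfl]; simp; omega
  | case2 a b h rem ih =>
      rw [mutualPrimeLoop, dif_neg h]
      have hbpos : 0 < b := by omega
      have hmod : PySem.Int.mod a b = a % b := PySem.Int.mod_eq_emod_of_pos hbpos
      have hmn : 0 ≤ PySem.Int.mod a b := by rw [hmod]; exact Int.emod_nonneg a (by omega)
      show mutualPrimeLoop b (PySem.Int.mod a b) = _
      rw [ih hb hmn]
      congr 1
      have htn : (PySem.Int.mod a b).toNat = a.toNat % b.toNat := by
        rw [hmod]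
        conv_lhs => rw [← Int.toNat_of_nonneg ha, ← Int.toNat_of_nonneg (le_of_lt hbpos)]
        rw [← Int.natCast_mod, Int.toNat_natCast]
      rw [htn, Nat.gcd_comm a.toNat b.toNat, Nat.gcd_rec b.toNat a.toNat,
          Nat.gcd_comm (a.toNat % b.toNat) b.toNat]

-- ===== VERDICT (by name: the statement is the Claim_ definition above) =====
theorem mutual_prime_spec : Claim_equal_mutual_prime := by
  intro a b _
  unfold Spec_mutual_prime mutual_prime mutual_prime_alt
  by_cases hneg : a < 0 ∨ b < 0
  · have hB : (a < 0 || b < 0) = true := by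
      rcases hneg with h | h <;> simp [h]
    rw [hB, if_pos rfl]
    by_cases hab : a < b
    · have hA : a < 0 := by omega
      have := loop_neg b a hA
      simp only [hab, if_true]
      split <;> [omega; rfl]
    · have hBn : b < 0 := by omega
      have := loop_neg a b hBn
      simp only [hab, if_false]
      split <;> [omega; rfl]
  · obtain ⟨ha', hb'⟩ := not_or.mp hneg
    have ha : 0 ≤ a := by omega
    have hb : 0 ≤ b := by omega
    have hB : (a < 0 || b < 0) = false := by
      have h1 : ¬ a < 0 := by omega
      have h2 : ¬ b < 0 := by omega
      simp [h1, h2]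
    rw [hB]
    simp only [Bool.false_eq_true, if_false]
    rw [bgcdNat_eq_gcd]
    by_cases hab : a < b
    · simp only [hab, if_true]
      rw [loop_gcd b a hb ha, Nat.gcd_comm b.toNat a.toNat]
      by_cases h1 : Nat.gcd a.toNat b.toNat = 1 <;> simp [h1]
    · simp only [hab, if_false]
      rw [loop_gcd a b ha hb]
      by_cases h1 : Nat.gcd a.toNat b.toNat = 1 <;> simp [h1]
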